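-- pv_equiv track=rewrite | github.com/Sonia133/Tehnici-Avansate-de-Programare | Greedy/Varianta 1/Ex2.py | getSol
-- ===== SOURCE A (Python) =====
-- def getSol(n, activ, activSorted) :
--     currTime = 0
--     sol = [None] * n
--     delay = 0
--
--     for i in range(n):
--         sol[i] = ([currTime, currTime + activSorted[i][0]])
--         currTime += activSorted[i][0]
--         sol[i].append(currTime - activSorted[i][1])
--         delay = max(delay , currTime - activSorted[i][1])
--
--     return delay, sol
-- ===== SOURCE B (Python) =====
-- def getSol(n, activ, activSorted):
--     # Divide and conquer: schedule a half-open range of jobs [lo, hi) starting at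
--     # time `start`; return (max lateness clamped at 0, rows, finish time).
--     def solve(lo, hi, start):
--         if lo >= hi:
--             return 0, [], start
--         if hi - lo == 1:
--             finish = start + activSorted[lo][0]
--             late = finish - activSorted[lo][1]
--             return max(0, late), [[start, finish, late]], finish
--         mid = (lo + hi) // 2
--         dl, sl, t = solve(lo, mid, start)
--         dr, sr, t2 = solve(mid, hi, t)
--         return max(dl, dr), sl + sr, t2
--     delay, sol, _ = solve(0, n, 0)
--     return delay, sol
-- ===== Notes on version B (the rewrite author's own statement) =====
-- stated objective: alternative
-- what changed: Replaces A's single left-to-right loop with a running-time/running-max accumulator by a divide-and-conquer recursion: a segment [lo,hi) is split at its midpoint, each half is scheduled independently (the right half starting at the left half's finish time), and the halves' row lists and clamped max latenesses are merged.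
import Mathlib
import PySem

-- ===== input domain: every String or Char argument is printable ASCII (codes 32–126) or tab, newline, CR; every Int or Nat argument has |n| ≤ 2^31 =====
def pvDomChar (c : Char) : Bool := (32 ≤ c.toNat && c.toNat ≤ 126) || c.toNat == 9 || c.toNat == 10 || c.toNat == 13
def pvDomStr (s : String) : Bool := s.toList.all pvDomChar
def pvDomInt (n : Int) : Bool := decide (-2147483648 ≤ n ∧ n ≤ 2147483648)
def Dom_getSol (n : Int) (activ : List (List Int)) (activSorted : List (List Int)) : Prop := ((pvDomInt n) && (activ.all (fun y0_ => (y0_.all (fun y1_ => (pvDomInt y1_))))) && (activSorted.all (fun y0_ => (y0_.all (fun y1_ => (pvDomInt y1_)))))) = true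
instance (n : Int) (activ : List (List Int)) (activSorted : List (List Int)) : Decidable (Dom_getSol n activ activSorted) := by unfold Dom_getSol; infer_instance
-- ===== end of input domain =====

-- B replaces A's single accumulator loop by a divide-and-conquer recursion over job ranges
-- (objective: alternative decomposition, same return values).

-- ===== PORT A =====
-- single fold carrying (currTime, delay, sol); activSorted[i][j] via pyGetD (in range inside Pre_)
def getSol (n : Int) (activ : List (List Int)) (activSorted : List (List Int)) : Int × List (List Int) :=
  let st := (PySem.List.pyRange 0 n 1).foldl
    (fun (st : Int × Int × List (List Int)) i =>
      let currTime := st.1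
      let delay := st.2.1
      let sol := st.2.2
      let row := PySem.List.pyGetD activSorted i []
      let a0 := PySem.List.pyGetD row 0 0
      let a1 := PySem.List.pyGetD row 1 0
      let currTime' := currTime + a0
      (currTime', max delay (currTime' - a1),
       sol ++ [[currTime, currTime + a0, currTime' - a1]]))
    (0, 0, [])
  (st.2.1, st.2.2)

-- ===== PORT B =====
-- divide and conquer on the half-open job range [lo, hi); (lo+hi)//2 via PySem.Int.floordiv
def getSolSolve (as_ : List (List Int)) (lo hi start : Int) : Int × List (List Int) × Int :=
  if lo ≥ hi then (0, [], start)
  else if hi - lo = 1 then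
    let row := PySem.List.pyGetD as_ lo []
    let finish := start + PySem.List.pyGetD row 0 0
    let late := finish - PySem.List.pyGetD row 1 0
    (max 0 late, [[start, finish, late]], finish)
  else
    let mid := PySem.Int.floordiv (lo + hi) 2
    let L := getSolSolve as_ lo mid start
    let R := getSolSolve as_ mid hi L.2.2
    (max L.1 R.1, L.2.1 ++ R.2.1, R.2.2)
termination_by (hi - lo).toNat
decreasing_by
  · have h2 : PySem.Int.floordiv (lo + hi) 2 = (lo + hi) / 2 :=
      PySem.Int.floordiv_eq_ediv_of_pos (by omega)
    omega
  · have h2 : PySem.Int.floordiv (lo + hi) 2 = (lo + hi) / 2 :=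
      PySem.Int.floordiv_eq_ediv_of_pos (by omega)
    omega

def getSol_alt (n : Int) (activ : List (List Int)) (activSorted : List (List Int)) : Int × List (List Int) :=
  let r := getSolSolve activSorted 0 n 0
  (r.1, r.2.1)

-- ===== PRECONDITION & SPEC =====
-- Pre_ excludes exactly the inputs where Python A raises IndexError: n beyond activSorted's
-- length, or one of the first n rows shorter than 2.
def Pre_getSol (n : Int) (activ : List (List Int)) (activSorted : List (List Int)) : Prop :=
  n ≤ activSorted.length ∧ ∀ row ∈ activSorted.take n.toNat, 2 ≤ row.length
instance (n : Int) (activ : List (List Int)) (activSorted : List (List Int)) : Decidable (Pre_getSol n activ activSorted) := by unfold Pre_getSol; infer_instance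
def pvWitness_getSol : Int × List (List Int) × List (List Int) := (2, [[3, 1], [2, 4]], [[2, 4], [3, 1]])

def Spec_getSol (n : Int) (activ : List (List Int)) (activSorted : List (List Int)) (out : Int × List (List Int)) : Prop := out = getSol_alt n activ activSorted
instance (n : Int) (activ : List (List Int)) (activSorted : List (List Int)) (out : Int × List (List Int)) : Decidable (Spec_getSol n activ activSorted out) := by unfold Spec_getSol; infer_instance

-- ===== CLAIM (what is proved, stated in full; the proofs are below) =====
def Claim_equal_getSol : Prop := ∀ (n : Int) (activ : List (List Int)) (activSorted : List (List Int)), Dom_getSol n activ activSorted → Pre_getSol n activ activSorted → Spec_getSol n activ activSorted (getSol n activ activSorted)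

-- ===== LEMMAS AND PROOFS =====

-- closed-form reference pieces (k-th duration, k-th penalty, prefix sum of durations)
def pvA0 (as_ : List (List Int)) (k : Nat) : Int :=
  PySem.List.pyGetD (PySem.List.pyGetD as_ (k : Int) []) 0 0
def pvA1 (as_ : List (List Int)) (k : Nat) : Int :=
  PySem.List.pyGetD (PySem.List.pyGetD as_ (k : Int) []) 1 0
def pvS (as_ : List (List Int)) : Nat → Int
  | 0 => 0
  | k + 1 => pvS as_ k + pvA0 as_ k
def pvLate (as_ : List (List Int)) (k : Nat) : Int := pvS as_ (k + 1) - pvA1 as_ k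

theorem pvRange_eq (n : Int) : PySem.List.pyRange 0 n 1 = (List.range n.toNat).map (fun k : Nat => (k : Int)) := by
  rw [PySem.List.pyRange_one]
  simp

-- A's fold in closed form
theorem getSol_fold (as_ : List (List Int)) (m : Nat) :
    ((List.range m).map (fun k : Nat => (k : Int))).foldl
      (fun (st : Int × Int × List (List Int)) i =>
        let currTime := st.1
        let delay := st.2.1
        let sol := st.2.2
        let row := PySem.List.pyGetD as_ i []
        let a0 := PySem.List.pyGetD row 0 0
        let a1 := PySem.List.pyGetD row 1 0
        let currTime' := currTime + a0
        (currTime', max delay (currTime' - a1),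
         sol ++ [[currTime, currTime + a0, currTime' - a1]]))
      (0, 0, [])
    = (pvS as_ m,
       ((List.range m).map (pvLate as_)).foldl max 0,
       (List.range m).map (fun k => [pvS as_ k, pvS as_ (k + 1), pvLate as_ k])) := by
  induction m with
  | zero => simp [pvS]
  | succ m ih =>
    rw [List.range_succ]
    simp only [List.map_append, List.foldl_append, ih, List.map_cons, List.map_nil,
      List.foldl_cons, List.foldl_nil]
    simp [pvS, pvA0, pvA1, pvLate]

theorem foldl_max_nonneg (l : List Int) (a : Int) (ha : 0 ≤ a) :
    l.foldl max a = max a (l.foldl max 0) := by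
  induction l generalizing a with
  | nil => simp; omega
  | cons y t ih =>
    simp only [List.foldl_cons]
    rw [ih (max a y) (by omega), ih (max 0 y) (by omega)]
    omega

theorem foldl_max_zero_nonneg (l : List Int) : 0 ≤ l.foldl max 0 := by
  rw [foldl_max_nonneg l 0 le_rfl]; omega

-- B's divide-and-conquer in closed form over [k, k+len)
theorem solve_closed (as_ : List (List Int)) (len : Nat) :
    ∀ k : Nat, getSolSolve as_ (k : Int) ((k + len : Nat) : Int) (pvS as_ k)
      = (((List.range' k len).map (pvLate as_)).foldl max 0,
         (List.range' k len).map (fun j => [pvS as_ j, pvS as_ (j + 1), pvLate as_ j]),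
         pvS as_ (k + len)) := by
  induction len using Nat.strong_induction_on with
  | _ len ih =>
    intro k
    match len, ih with
    | 0, _ =>
      rw [getSolSolve]
      simp
    | 1, _ =>
      rw [getSolSolve]
      have h1 : ¬ ((k : Int) ≥ ((k + 1 : Nat) : Int)) := by push_cast; omega
      have h2 : ((k + 1 : Nat) : Int) - (k : Int) = 1 := by push_cast; omega
      simp only [h1, if_false, h2, if_true]
      simp [pvLate, pvS, pvA0, pvA1]
    | (len + 2), ih =>
      have hlen : 2 ≤ len + 2 := by omega
      rw [getSolSolve]
      have h1 : ¬ ((k : Int) ≥ ((k + (len + 2) : Nat) : Int)) := by push_cast; omega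
      have h2 : ¬ (((k + (len + 2) : Nat) : Int) - (k : Int) = 1) := by push_cast; omega
      set a := (len + 2) / 2 with ha
      have ha1 : 1 ≤ a := by omega
      have ha2 : a < len + 2 := by omega
      have hmid : PySem.Int.floordiv ((k : Int) + ((k + (len + 2) : Nat) : Int)) 2 = ((k + a : Nat) : Int) := by
        rw [PySem.Int.floordiv_eq_ediv_of_pos (by omega)]
        push_cast
        omega
      have hL := ih a (by omega) k
      have hR := ih (len + 2 - a) (by omega) (k + a)
      have hcast : ((k + a) + (len + 2 - a) : Nat) = k + (len + 2) := by omega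
      rw [hcast] at hR
      simp only [h1, if_false, h2, if_false, hmid]
      rw [hL, hR]
      have hsplit : List.range' k (len + 2) = List.range' k a ++ List.range' (k + a) (len + 2 - a) := by
        obtain ⟨b, hb⟩ : ∃ b, len + 2 - a = b := ⟨_, rfl⟩
        rw [hb]
        have hn2 : len + 2 = a + b := by omega
        rw [hn2]
        exact List.range'_append_1.symm
      rw [hsplit, List.map_append, List.map_append, List.foldl_append,
        foldl_max_nonneg _ _ (foldl_max_zero_nonneg _)]

theorem getSol_eq_alt (n : Int) (activ : List (List Int)) (activSorted : List (List Int)) :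
    getSol n activ activSorted = getSol_alt n activ activSorted := by
  simp only [getSol, getSol_alt]
  rw [pvRange_eq, getSol_fold]
  by_cases hn : n ≤ 0
  · have h0 : n.toNat = 0 := by omega
    rw [getSolSolve]
    have : (0 : Int) ≥ n := by omega
    simp [this, h0]
  · have hcast : ((0 + n.toNat : Nat) : Int) = n := by omega
    have h := solve_closed activSorted n.toNat 0
    rw [hcast] at h
    have h0 : pvS activSorted 0 = 0 := rfl
    rw [h0] at h
    rw [show ((0 : Nat) : Int) = (0 : Int) from rfl] at h
    rw [h]
    simp [List.range_eq_range']

-- ===== VERDICT (by name: the statement is the Claim_ definition above) =====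
theorem getSol_spec : Claim_equal_getSol := by
  intro n activ activSorted _ _
  unfold Spec_getSol
  exact getSol_eq_alt n activ activSorted
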